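-- pv_equiv track=rewrite | github.com/emmetjs8/download-BEA-data | downloadBeaDatasets.py | extractParamInfo
-- ===== SOURCE A (Python) =====
-- def ensureResponseIsList(value):
--     """
--     Ensures that the value is returned as a list.
--     If the value is a dictionary, it wraps it in a list.
--     If it's already a list, it returns it unchanged.
--     """
--     if isinstance(value, dict):
--         return [value]  # Wrap the dictionary in a list
--     elif isinstance(value, list):
--         return value  # Return the list as it is
--     return []  # Default case: return an empty list
--
-- def extractParamInfo(parameters):
--     """
--     Extract parameter attributes from a list of parameters.
--
--     :param parameters: A list of parameter dictionaries.
--     :return: Six lists: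
--         - paramNames: List of parameter names.
--         - paramDescriptions: List of parameter descriptions.
--         - paramRequiredInRequest: List indicating if the parameter is required.
--         - paramDefaultVals: List of default values for the parameters.
--         - paramMultipleValsAcceptedInRequest: List indicating if multiple values are accepted.
--         - paramAllValueRequest: List indicating if the parameter accepts a command for downloading All data.
--     """
--     paramNames = []
--     paramDescriptions = []
--     paramRequiredInRequest = []
--     paramDefaultVals = []
--     paramMultipleValsAcceptedInRequest = []
--     paramAllValueRequest = []
--
--     for param in ensureResponseIsList(parameters):
--         paramNames.append(param.get('ParameterName', 'N/A'))
--         paramDescriptions.append(param.get('ParameterDescription', 'N/A'))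
--         paramRequiredInRequest.append(param.get('ParameterIsRequiredFlag', 'N/A'))
--         paramDefaultVals.append(param.get('ParameterDefaultValue', 'N/a'))
--         paramMultipleValsAcceptedInRequest.append(param.get('MultipleAcceptedFlag', 'N/a'))
--         paramAllValueRequest.append(param.get('AllValue', 'N/a'))
--
--     return (
--         paramNames,
--         paramDescriptions,
--         paramRequiredInRequest,
--         paramDefaultVals,
--         paramMultipleValsAcceptedInRequest,
--         paramAllValueRequest
--     )
-- ===== SOURCE B (Python) =====
-- def ensureResponseIsList(value):
--     if isinstance(value, dict):
--         return [value]
--     elif isinstance(value, list):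
--         return value
--     return []
--
-- def _column(params, key, default):
--     """One full pass extracting a single attribute column."""
--     return [p.get(key, default) for p in params]
--
-- def extractParamInfo(parameters):
--     ps = ensureResponseIsList(parameters)
--     return (
--         _column(ps, 'ParameterName', 'N/A'),
--         _column(ps, 'ParameterDescription', 'N/A'),
--         _column(ps, 'ParameterIsRequiredFlag', 'N/A'),
--         _column(ps, 'ParameterDefaultValue', 'N/a'),
--         _column(ps, 'MultipleAcceptedFlag', 'N/a'),
--         _column(ps, 'AllValue', 'N/a'),
--     )
-- ===== Notes on version B (the rewrite author's own statement) =====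
-- stated objective: simpler
-- what changed: B replaces A's single loop that appends into six parallel accumulator lists with six independent staged passes, each a one-line _column helper extracting one attribute, so there is no mutable loop state at all.
import Mathlib
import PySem

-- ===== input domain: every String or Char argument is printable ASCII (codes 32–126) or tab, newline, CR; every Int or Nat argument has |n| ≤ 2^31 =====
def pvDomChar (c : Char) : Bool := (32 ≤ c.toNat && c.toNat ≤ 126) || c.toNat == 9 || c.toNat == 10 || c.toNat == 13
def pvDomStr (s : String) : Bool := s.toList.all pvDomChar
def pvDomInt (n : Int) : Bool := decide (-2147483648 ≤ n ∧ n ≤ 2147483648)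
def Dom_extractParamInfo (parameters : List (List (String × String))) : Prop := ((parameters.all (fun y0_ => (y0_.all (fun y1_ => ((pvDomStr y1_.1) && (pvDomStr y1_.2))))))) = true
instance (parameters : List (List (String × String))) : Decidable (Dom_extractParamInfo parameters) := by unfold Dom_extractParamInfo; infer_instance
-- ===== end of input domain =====

-- B replaces A's single loop appending into six parallel accumulator lists by six independent
-- staged passes, one per attribute, through a shared column helper (objective: simpler).


-- dict.get(k, default) on an association list: first match (shared Python primitive)
def pyDictGetD (p : List (String × String)) (k d : String) : String :=
  ((p.find? (fun kv => kv.1 == k)).map (fun kv => kv.2)).getD d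

-- ===== PORT A =====
-- value is always a list here (the dict/other branches of the Python are unreachable at this type)
def ensureResponseIsList (value : List (List (String × String))) : List (List (String × String)) :=
  value

def extractParamInfo (parameters : List (List (String × String))) : List String × List String × List String × List String × List String × List String :=
  (ensureResponseIsList parameters).foldl
    (fun acc param =>
      (acc.1 ++ [pyDictGetD param "ParameterName" "N/A"],
       acc.2.1 ++ [pyDictGetD param "ParameterDescription" "N/A"],
       acc.2.2.1 ++ [pyDictGetD param "ParameterIsRequiredFlag" "N/A"],
       acc.2.2.2.1 ++ [pyDictGetD param "ParameterDefaultValue" "N/a"],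
       acc.2.2.2.2.1 ++ [pyDictGetD param "MultipleAcceptedFlag" "N/a"],
       acc.2.2.2.2.2 ++ [pyDictGetD param "AllValue" "N/a"]))
    ([], [], [], [], [], [])

-- ===== PORT B =====
-- one full pass extracting a single attribute column (Source B's _column)
def pvColumn (params : List (List (String × String))) (key default : String) : List String :=
  params.map (fun p => pyDictGetD p key default)

def extractParamInfo_alt (parameters : List (List (String × String))) : List String × List String × List String × List String × List String × List String :=
  let ps := ensureResponseIsList parameters
  (pvColumn ps "ParameterName" "N/A",
   pvColumn ps "ParameterDescription" "N/A",
   pvColumn ps "ParameterIsRequiredFlag" "N/A",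
   pvColumn ps "ParameterDefaultValue" "N/a",
   pvColumn ps "MultipleAcceptedFlag" "N/a",
   pvColumn ps "AllValue" "N/a")

-- ===== PRECONDITION & SPEC =====
def Spec_extractParamInfo (parameters : List (List (String × String))) (out : List String × List String × List String × List String × List String × List String) : Prop := out = extractParamInfo_alt parameters
instance (parameters : List (List (String × String))) (out : List String × List String × List String × List String × List String × List String) : Decidable (Spec_extractParamInfo parameters out) := by unfold Spec_extractParamInfo; infer_instance

-- ===== CLAIM (what is proved, stated in full; the proofs are below) =====
def Claim_equal_extractParamInfo : Prop := ∀ (parameters : List (List (String × String))), Dom_extractParamInfo parameters → Spec_extractParamInfo parameters (extractParamInfo parameters)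

-- ===== LEMMAS AND PROOFS =====

-- A's loop with arbitrary accumulators appends the six extracted columns.
theorem foldl_six_append (l : List (List (String × String)))
    (n d r dv m a : List String) :
    l.foldl
      (fun acc param =>
        (acc.1 ++ [pyDictGetD param "ParameterName" "N/A"],
         acc.2.1 ++ [pyDictGetD param "ParameterDescription" "N/A"],
         acc.2.2.1 ++ [pyDictGetD param "ParameterIsRequiredFlag" "N/A"],
         acc.2.2.2.1 ++ [pyDictGetD param "ParameterDefaultValue" "N/a"],
         acc.2.2.2.2.1 ++ [pyDictGetD param "MultipleAcceptedFlag" "N/a"],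
         acc.2.2.2.2.2 ++ [pyDictGetD param "AllValue" "N/a"]))
      (n, d, r, dv, m, a) =
    (n ++ pvColumn l "ParameterName" "N/A",
     d ++ pvColumn l "ParameterDescription" "N/A",
     r ++ pvColumn l "ParameterIsRequiredFlag" "N/A",
     dv ++ pvColumn l "ParameterDefaultValue" "N/a",
     m ++ pvColumn l "MultipleAcceptedFlag" "N/a",
     a ++ pvColumn l "AllValue" "N/a") := by
  induction l generalizing n d r dv m a with
  | nil => simp [pvColumn]
  | cons h t ih => simp [List.foldl_cons, ih, pvColumn]

-- ===== VERDICT (by name: the statement is the Claim_ definition above) =====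
theorem extractParamInfo_spec : Claim_equal_extractParamInfo := by
  intro parameters _
  unfold Spec_extractParamInfo extractParamInfo extractParamInfo_alt
  rw [foldl_six_append]
  simp [ensureResponseIsList]
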